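-- pv_equiv track=rewrite | github.com/kendall-wood/blackbuy | data-normalizer/normalize.py | map_product_type
-- ===== SOURCE A (Python) =====
-- def map_product_type(name, description, categories, product_type_synonyms):
--     """Map product name/description to canonical product_type"""
--     text = f"{name} {description}".lower()
--
--     # Direct matching against synonyms
--     for synonym, canonical in product_type_synonyms.items():
--         if synonym.lower() in text:
--             return canonical
--
--     # Category-based fallback
--     if categories:
--         cat_text = str(categories).lower()
--         for synonym, canonical in product_type_synonyms.items():
--             if synonym.lower() in cat_text:
--                 return canonical
--
--     return "Other"
-- ===== SOURCE B (Python) =====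
-- def map_product_type(name, description, categories, product_type_synonyms):
--     """Map product name/description to canonical product_type (single pass over the synonym dict)."""
--     text = (name + " " + description).lower()
--     cat_text = str(categories).lower() if categories else None
--     text_hit = None
--     cat_hit = None
--     for synonym, canonical in product_type_synonyms.items():
--         low = synonym.lower()
--         if text_hit is None and low in text:
--             text_hit = canonical
--         if cat_text is not None and cat_hit is None and low in cat_text:
--             cat_hit = canonical
--     if text_hit is not None:
--         return text_hit
--     if cat_hit is not None:
--         return cat_hit
--     return "Other"
-- ===== Notes on version B (the rewrite author's own statement) =====
-- stated objective: alternative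
-- what changed: A's two sequential early-return scans over the synonym dict (text scan, then category-repr scan) are replaced by a single fold over the dict that records the first text match and the first category match in two accumulators and combines them at the end.
import Mathlib
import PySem

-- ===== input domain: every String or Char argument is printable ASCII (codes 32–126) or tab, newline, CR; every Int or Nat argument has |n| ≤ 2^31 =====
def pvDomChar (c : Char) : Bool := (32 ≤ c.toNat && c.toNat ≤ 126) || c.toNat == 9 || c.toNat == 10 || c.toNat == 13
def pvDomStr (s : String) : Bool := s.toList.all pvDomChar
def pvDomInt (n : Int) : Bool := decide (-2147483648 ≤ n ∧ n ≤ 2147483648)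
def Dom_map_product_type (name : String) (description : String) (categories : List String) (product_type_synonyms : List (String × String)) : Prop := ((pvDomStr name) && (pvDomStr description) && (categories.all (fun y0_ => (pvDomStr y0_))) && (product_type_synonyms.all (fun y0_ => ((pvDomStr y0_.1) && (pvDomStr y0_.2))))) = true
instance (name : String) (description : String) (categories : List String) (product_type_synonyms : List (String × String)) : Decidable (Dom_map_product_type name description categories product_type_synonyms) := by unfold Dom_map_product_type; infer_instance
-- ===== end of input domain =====

-- B replaces A's two sequential early-return scans of the synonym dict by ONE fold carrying the
-- first text match and the first category match; same return value on every input (alternative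
-- decomposition, no speed claim).

-- Shared helpers: both Pythons compute f"{name} {description}".lower() and str(categories).lower()
-- with the same built-ins, so the ports share these transcriptions.
-- text = f"{name} {description}".lower()
def pvMkText (name description : String) : String :=
  PySem.Str.lower (String.ofList (name.toList ++ ' ' :: description.toList))

-- CPython repr() of a str over the printable-ASCII + tab/newline/CR domain (exact there):
-- quote choice, backslash/quote escaping, \t \n \r escapes.
def pvReprEsc (q : Char) (c : Char) : List Char :=
  if c = '\\' then ['\\', '\\']
  else if c = q then ['\\', q]
  else if c = '\t' then ['\\', 't']
  else if c = '\n' then ['\\', 'n']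
  else if c = '\r' then ['\\', 'r']
  else [c]

def pvReprStr (s : String) : String :=
  let cs := s.toList
  let q : Char := if cs.contains '\'' && !(cs.contains '"') then '"' else '\''
  String.ofList (q :: cs.flatMap (pvReprEsc q) ++ [q])

-- str(categories).lower()  (str of a list of str = '[' + ', '.join(repr(x)) + ']')
def pvCatText (categories : List String) : String :=
  PySem.Str.lower
    (String.ofList ('[' :: (PySem.Str.join ", " (categories.map pvReprStr)).toList ++ [']']))

-- ===== PORT A =====
-- A's for-loop with early return = find-first recursion over the synonym pairs.
def mptScan (text : String) : List (String × String) → Option String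
  | [] => none
  | (synonym, canonical) :: rest =>
      if PySem.Str.isIn (PySem.Str.lower synonym) text then some canonical
      else mptScan text rest

def map_product_type (name : String) (description : String) (categories : List String) (product_type_synonyms : List (String × String)) : String :=
  match mptScan (pvMkText name description) product_type_synonyms with
  | some canonical => canonical
  | none =>
      if categories.isEmpty then "Other"
      else
        match mptScan (pvCatText categories) product_type_synonyms with
        | some canonical => canonical
        | none => "Other"

-- ===== PORT B =====
-- Source B's loop body: update (text_hit, cat_hit) from one synonym pair.
def mptStep (text : String) (cat? : Option String)
    (acc : Option String × Option String) (p : String × String) :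
    Option String × Option String :=
  let low := PySem.Str.lower p.1
  let th := match acc.1 with
    | some c => some c
    | none => if PySem.Str.isIn low text then some p.2 else none
  let ch := match cat? with
    | none => acc.2
    | some ct => match acc.2 with
      | some c => some c
      | none => if PySem.Str.isIn low ct then some p.2 else none
  (th, ch)

def map_product_type_alt (name : String) (description : String) (categories : List String) (product_type_synonyms : List (String × String)) : String :=
  let hits := product_type_synonyms.foldl
    (mptStep (pvMkText name description)
      (if categories.isEmpty then none else some (pvCatText categories))) (none, none)
  match hits.1 with
  | some c => c
  | none => match hits.2 with
    | some c => c
    | none => "Other"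

-- ===== PRECONDITION & SPEC =====
def Spec_map_product_type (name : String) (description : String) (categories : List String) (product_type_synonyms : List (String × String)) (out : String) : Prop := out = map_product_type_alt name description categories product_type_synonyms
instance (name : String) (description : String) (categories : List String) (product_type_synonyms : List (String × String)) (out : String) : Decidable (Spec_map_product_type name description categories product_type_synonyms out) := by unfold Spec_map_product_type; infer_instance

-- ===== CLAIM (what is proved, stated in full; the proofs are below) =====
def Claim_equal_map_product_type : Prop := ∀ (name : String) (description : String) (categories : List String) (product_type_synonyms : List (String × String)), Dom_map_product_type name description categories product_type_synonyms → Spec_map_product_type name description categories product_type_synonyms (map_product_type name description categories product_type_synonyms)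

-- ===== LEMMAS AND PROOFS =====

-- Invariant of B's single pass: the fold computes exactly A's two find-first scans,
-- seeded with whatever the accumulators already hold.
theorem mptStep_eq (text : String) (cat? : Option String) (a b : Option String) (p : String × String) :
    mptStep text cat? (a, b) p =
      ((match a with
        | some c => some c
        | none => if PySem.Str.isIn (PySem.Str.lower p.1) text then some p.2 else none),
       (match cat? with
        | none => b
        | some ct => match b with
          | some c => some c
          | none => if PySem.Str.isIn (PySem.Str.lower p.1) ct then some p.2 else none)) := by
  cases a <;> cases cat? <;> cases b <;> rfl

theorem mptFold_eq (text : String) (cat? : Option String) :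
    ∀ (syns : List (String × String)) (a b : Option String),
      syns.foldl (mptStep text cat?) (a, b) =
        ((match a with | some c => some c | none => mptScan text syns),
         (match cat? with
          | none => b
          | some ct => match b with | some c => some c | none => mptScan ct syns)) := by
  intro syns
  induction syns with
  | nil =>
      intro a b
      cases a <;> cases b <;> cases cat? <;> simp [mptScan]
  | cons p rest ih =>
      intro a b
      rw [List.foldl_cons, mptStep_eq, ih]
      cases a <;> cases b <;> cases cat? <;>
        simp [mptScan] <;> split_ifs <;> simp

theorem mpt_eq (name description : String) (categories : List String)
    (syns : List (String × String)) :
    map_product_type name description categories syns =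
      map_product_type_alt name description categories syns := by
  unfold map_product_type map_product_type_alt
  rw [mptFold_eq]
  by_cases h : categories.isEmpty <;>
    simp only [h, if_true, Bool.false_eq_true, if_false] <;>
    cases mptScan (pvMkText name description) syns <;>
    first
      | rfl
      | (cases mptScan (pvCatText categories) syns <;> rfl)

-- ===== VERDICT (by name: the statement is the Claim_ definition above) =====
theorem map_product_type_spec : Claim_equal_map_product_type := by
  intro name description categories syns _
  unfold Spec_map_product_type
  exact mpt_eq name description categories syns
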